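-- pv_equiv track=rewrite | github.com/AuthByte/dash | scripts/apply_digest.py | ticker_variants_for_match
-- ===== SOURCE A (Python) =====
-- def normalize_ticker(ticker: str) -> str:
--     t = ticker.strip().upper()
--     aliases = {
--         "RPI.L": "RPI",
--         "HPS-A.TO": "HPS.A.TO",
--         "HPS.A": "HPS.A.TO",
--         "SIVE": "SIVE.ST",
--         "SIVE.PA": "SIVE.ST",
--     }
--     return aliases.get(t, t)
--
-- def ticker_variants_for_match(ticker: str) -> set[str]:
--     canonical = normalize_ticker(ticker)
--     variants = {canonical}
--     for alt, normalized in {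
--         "RPI.L": "RPI",
--         "HPS-A.TO": "HPS.A.TO",
--         "HPS.A": "HPS.A.TO",
--         "SIVE": "SIVE.ST",
--         "SIVE.PA": "SIVE.ST",
--     }.items():
--         if normalized == canonical:
--             variants.add(alt)
--     return variants
-- ===== SOURCE B (Python) =====
-- _ALIASES = {
--     "RPI.L": "RPI",
--     "HPS-A.TO": "HPS.A.TO",
--     "HPS.A": "HPS.A.TO",
--     "SIVE": "SIVE.ST",
--     "SIVE.PA": "SIVE.ST",
-- }
--
-- # reverse index: canonical -> aliases mapping to it, in the alias dict's order
-- _GROUPS = {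
--     "RPI": ["RPI.L"],
--     "HPS.A.TO": ["HPS-A.TO", "HPS.A"],
--     "SIVE.ST": ["SIVE", "SIVE.PA"],
-- }
--
-- def ticker_variants_for_match(ticker: str) -> set[str]:
--     t = ticker.strip().upper()
--     canonical = _ALIASES.get(t, t)
--     return {canonical} | set(_GROUPS.get(canonical, []))
-- ===== Notes on version B (the rewrite author's own statement) =====
-- stated objective: idiomatic
-- what changed: Replaces the per-entry conditional scan of the alias dict with a single lookup in a precomputed reverse index grouping aliases by their canonical form.
import Mathlib
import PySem

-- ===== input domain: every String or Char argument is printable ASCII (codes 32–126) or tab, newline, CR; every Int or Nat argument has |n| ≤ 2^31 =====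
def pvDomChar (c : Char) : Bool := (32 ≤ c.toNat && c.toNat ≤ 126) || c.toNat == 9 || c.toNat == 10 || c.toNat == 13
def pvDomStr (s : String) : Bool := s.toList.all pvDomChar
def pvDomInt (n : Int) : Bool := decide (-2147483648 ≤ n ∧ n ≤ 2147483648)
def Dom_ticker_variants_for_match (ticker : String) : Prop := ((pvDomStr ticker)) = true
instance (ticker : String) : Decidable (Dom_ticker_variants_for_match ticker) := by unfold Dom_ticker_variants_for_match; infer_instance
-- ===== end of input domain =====

-- B replaces A's per-entry conditional scan of the alias dict with one lookup in a
-- precomputed reverse index (canonical -> aliases); objective: idiomatic.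

-- ===== PORT A =====
def normalize_ticker (ticker : String) : String :=
  let t := PySem.Str.upper (PySem.Str.strip ticker)
  let aliases : PySem.Dict String String :=
    PySem.Dict.ofList [("RPI.L", "RPI"), ("HPS-A.TO", "HPS.A.TO"), ("HPS.A", "HPS.A.TO"),
     ("SIVE", "SIVE.ST"), ("SIVE.PA", "SIVE.ST")]
  PySem.Dict.getD aliases t t

def ticker_variants_for_match (ticker : String) : List String :=
  let canonical := normalize_ticker ticker
  let variants : PySem.Set String := PySem.Set.ofList [canonical]
  ([("RPI.L", "RPI"), ("HPS-A.TO", "HPS.A.TO"), ("HPS.A", "HPS.A.TO"),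
    ("SIVE", "SIVE.ST"), ("SIVE.PA", "SIVE.ST")] : List (String × String)).foldl
    (fun v p => if p.2 == canonical then PySem.Set.add v p.1 else v) variants

-- ===== PORT B =====
def pvAliases : PySem.Dict String String :=
  PySem.Dict.ofList [("RPI.L", "RPI"), ("HPS-A.TO", "HPS.A.TO"), ("HPS.A", "HPS.A.TO"),
   ("SIVE", "SIVE.ST"), ("SIVE.PA", "SIVE.ST")]

-- reverse index: canonical -> aliases mapping to it, in the alias dict's order
def pvGroups : PySem.Dict String (List String) :=
  PySem.Dict.mk [("RPI", ["RPI.L"]), ("HPS.A.TO", ["HPS-A.TO", "HPS.A"]), ("SIVE.ST", ["SIVE", "SIVE.PA"])]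

def ticker_variants_for_match_alt (ticker : String) : List String :=
  let t := PySem.Str.upper (PySem.Str.strip ticker)
  let canonical := PySem.Dict.getD pvAliases t t
  PySem.Set.union (PySem.Set.ofList [canonical])
    (PySem.Set.ofList (PySem.Dict.getD pvGroups canonical []))

-- ===== PRECONDITION & SPEC =====
def Spec_ticker_variants_for_match (ticker : String) (out : List String) : Prop := out = ticker_variants_for_match_alt ticker
instance (ticker : String) (out : List String) : Decidable (Spec_ticker_variants_for_match ticker out) := by unfold Spec_ticker_variants_for_match; infer_instance

-- ===== CLAIM (what is proved, stated in full; the proofs are below) =====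
def Claim_equal_ticker_variants_for_match : Prop := ∀ (ticker : String), Dom_ticker_variants_for_match ticker → Spec_ticker_variants_for_match ticker (ticker_variants_for_match ticker)

-- ===== LEMMAS AND PROOFS =====

-- both ports are the same function of the canonical form; we prove the cores equal
lemma pv_core_eq (c : String) :
    ([("RPI.L", "RPI"), ("HPS-A.TO", "HPS.A.TO"), ("HPS.A", "HPS.A.TO"),
      ("SIVE", "SIVE.ST"), ("SIVE.PA", "SIVE.ST")] : List (String × String)).foldl
      (fun v p => if p.2 == c then PySem.Set.add v p.1 else v) (PySem.Set.ofList [c])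
    = PySem.Set.union (PySem.Set.ofList [c])
        (PySem.Set.ofList (PySem.Dict.getD pvGroups c [])) := by
  by_cases h1 : c = "RPI"
  · subst h1; decide
  by_cases h2 : c = "HPS.A.TO"
  · subst h2; decide
  by_cases h3 : c = "SIVE.ST"
  · subst h3; decide
  simp [pvGroups, PySem.Dict.getD, Ne.symm h1, Ne.symm h2,
        Ne.symm h3, PySem.Set.union, PySem.Set.ofList, PySem.Set.update, PySem.Dict.get?]

-- ===== VERDICT (by name: the statement is the Claim_ definition above) =====
theorem ticker_variants_for_match_spec : Claim_equal_ticker_variants_for_match := by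
  intro ticker _
  unfold Spec_ticker_variants_for_match ticker_variants_for_match ticker_variants_for_match_alt
    normalize_ticker
  exact pv_core_eq _
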